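-- pv_equiv track=rewrite | github.com/doobMM/hibari_tda | tda_pipeline/experiments/run_phase3_task38a_dft_gap0.py | replicate_inst1
-- ===== SOURCE A (Python) =====
-- MODULE_LEN = 32
--
-- N_INST1_COPIES = 33
--
-- def replicate_inst1(module_notes: list[tuple[int, int, int]]) -> list[tuple[int, int, int]]:
--     out: list[tuple[int, int, int]] = []
--     for m in range(N_INST1_COPIES):
--         off = m * MODULE_LEN
--         for s, p, e in module_notes:
--             ns = s + off
--             ne = min(e + off, off + MODULE_LEN)
--             if ns < off + MODULE_LEN and ne > ns:
--                 out.append((ns, p, ne))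
--     return out
-- ===== SOURCE B (Python) =====
-- MODULE_LEN = 32
--
-- N_INST1_COPIES = 33
--
-- def replicate_inst1(module_notes: list[tuple[int, int, int]]) -> list[tuple[int, int, int]]:
--     # Note-major generation + transpose: build, per surviving note, its column of
--     # 33 replicas, then transpose with zip(*) to recover the copy-major order.
--     cols = []
--     for s, p, e in module_notes:
--         ce = min(e, MODULE_LEN)
--         if s < MODULE_LEN and ce > s:
--             cols.append([(s + m * MODULE_LEN, p, ce + m * MODULE_LEN)
--                          for m in range(N_INST1_COPIES)])
--     out: list[tuple[int, int, int]] = []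
--     for row in zip(*cols):
--         out.extend(row)
--     return out
-- ===== Notes on version B (the rewrite author's own statement) =====
-- stated objective: alternative
-- what changed: B generates the result note-major (one column of 33 shifted replicas per surviving note, filtered and clipped once) and then transposes with zip(*cols) to recover A's copy-major append order, instead of A's 33-fold re-filtering copy loop.
import Mathlib
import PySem

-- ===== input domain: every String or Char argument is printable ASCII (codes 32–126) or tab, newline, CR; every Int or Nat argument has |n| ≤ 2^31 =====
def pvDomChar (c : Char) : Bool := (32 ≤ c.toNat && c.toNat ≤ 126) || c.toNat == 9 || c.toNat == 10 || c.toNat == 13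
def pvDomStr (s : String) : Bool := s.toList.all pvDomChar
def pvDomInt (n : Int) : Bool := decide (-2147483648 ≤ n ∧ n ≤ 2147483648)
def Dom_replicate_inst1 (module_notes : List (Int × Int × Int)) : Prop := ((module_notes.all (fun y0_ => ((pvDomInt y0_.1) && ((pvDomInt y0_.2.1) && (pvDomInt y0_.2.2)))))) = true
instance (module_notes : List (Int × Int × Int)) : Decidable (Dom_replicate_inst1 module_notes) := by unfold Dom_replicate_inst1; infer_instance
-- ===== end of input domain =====

-- ===== PORT A =====
-- Header: B builds the result note-major (a column of 33 replicas per surviving note) and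
-- transposes it back to A's copy-major order (objective: alternative decomposition).
def replicate_inst1 (module_notes : List (Int × Int × Int)) : List (Int × Int × Int) :=
  (PySem.List.pyRange 0 33 1).foldl
    (fun out m =>
      let off : Int := m * 32
      module_notes.foldl
        (fun out t =>
          let s := t.1; let p := t.2.1; let e := t.2.2
          let ns := s + off
          let ne := min (e + off) (off + 32)
          if ns < off + 32 ∧ ne > ns then out ++ [(ns, p, ne)] else out)
        out)
    []

-- ===== PORT B =====
-- exact port of Python's zip(*cols): rows until the shortest column is exhausted
def pyZipStar {T : Type} [Inhabited T] (cols : List (List T)) : List (List T) :=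
  if h : cols = [] ∨ cols.any (fun c => c.isEmpty) then []
  else (cols.map (fun c => c.headI)) :: pyZipStar (cols.map (fun c => c.tail))
termination_by cols.headI.length
decreasing_by
  rw [not_or] at h
  obtain ⟨h1, h2⟩ := h
  cases cols with
  | nil => exact absurd rfl h1
  | cons c cs =>
    simp only [List.any_cons, Bool.or_eq_true, not_or] at h2
    simp only [List.map_cons, List.headI_cons]
    cases c with
    | nil => simp [List.isEmpty] at h2
    | cons x xs => simp

def replicate_inst1_alt (module_notes : List (Int × Int × Int)) : List (Int × Int × Int) :=
  let cols := module_notes.foldl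
    (fun cols t =>
      let s := t.1; let p := t.2.1; let e := t.2.2
      let ce := min e 32
      if s < 32 ∧ ce > s then
        cols ++ [(PySem.List.pyRange 0 33 1).map (fun m => (s + m * 32, p, ce + m * 32))]
      else cols)
    []
  (pyZipStar cols).foldl (fun out row => out ++ row) []

-- ===== PRECONDITION & SPEC =====
def Spec_replicate_inst1 (module_notes : List (Int × Int × Int)) (out : List (Int × Int × Int)) : Prop := out = replicate_inst1_alt module_notes
instance (module_notes : List (Int × Int × Int)) (out : List (Int × Int × Int)) : Decidable (Spec_replicate_inst1 module_notes out) := by unfold Spec_replicate_inst1; infer_instance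

-- ===== CLAIM (what is proved, stated in full; the proofs are below) =====
def Claim_equal_replicate_inst1 : Prop := ∀ (module_notes : List (Int × Int × Int)), Dom_replicate_inst1 module_notes → Spec_replicate_inst1 module_notes (replicate_inst1 module_notes)

-- ===== LEMMAS AND PROOFS =====

-- named step functions (definitionally equal to the ports' loop bodies)
def stepBase (base : List (Int × Int × Int)) (t : Int × Int × Int) : List (Int × Int × Int) :=
  let s := t.1; let p := t.2.1; let e := t.2.2
  let ce := min e 32
  if s < 32 ∧ ce > s then base ++ [(s, p, ce)] else base

def pvBase (ns : List (Int × Int × Int)) : List (Int × Int × Int) := ns.foldl stepBase []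

def stepA (off : Int) (out : List (Int × Int × Int)) (t : Int × Int × Int) : List (Int × Int × Int) :=
  let s := t.1; let p := t.2.1; let e := t.2.2
  let ns := s + off
  let ne := min (e + off) (off + 32)
  if ns < off + 32 ∧ ne > ns then out ++ [(ns, p, ne)] else out

def stepCols (cols : List (List (Int × Int × Int))) (t : Int × Int × Int) : List (List (Int × Int × Int)) :=
  let s := t.1; let p := t.2.1; let e := t.2.2
  let ce := min e 32
  if s < 32 ∧ ce > s then
    cols ++ [(PySem.List.pyRange 0 33 1).map (fun m => (s + m * 32, p, ce + m * 32))]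
  else cols

def pvShift (off : Int) (b : Int × Int × Int) : Int × Int × Int := (b.1 + off, b.2.1, b.2.2 + off)

theorem base_acc (ns : List (Int × Int × Int)) (acc : List (Int × Int × Int)) :
    ns.foldl stepBase acc = acc ++ pvBase ns := by
  induction ns generalizing acc with
  | nil => simp [pvBase]
  | cons h t ih =>
    rw [pvBase, List.foldl_cons, List.foldl_cons, ih, ih (stepBase [] h)]
    unfold stepBase
    dsimp only
    split_ifs <;> simp

-- A's inner loop for copy m appends the shifted base
theorem inner_eq (ns : List (Int × Int × Int)) (off : Int) (out : List (Int × Int × Int)) :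
    ns.foldl (stepA off) out = out ++ (pvBase ns).map (pvShift off) := by
  induction ns generalizing out with
  | nil => simp [pvBase]
  | cons h t ih =>
    obtain ⟨s, p, e⟩ := h
    rw [List.foldl_cons, ih]
    have hb : pvBase ((s, p, e) :: t) = stepBase [] (s, p, e) ++ pvBase t := by
      rw [pvBase, List.foldl_cons, base_acc]
    rw [hb]
    have hstep : stepA off out (s, p, e) = out ++ (stepBase [] (s, p, e)).map (pvShift off) := by
      unfold stepA stepBase pvShift
      have hc : (s + off < off + 32 ∧ min (e + off) (off + 32) > s + off) ↔ (s < 32 ∧ min e 32 > s) := by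
        constructor <;> intro hh <;> omega
      have hmin : min (e + off) (off + 32) = min e 32 + off := by omega
      by_cases h1 : s < 32 ∧ min e 32 > s
      · rw [if_pos (hc.mpr h1), if_pos h1, hmin]; simp
      · rw [if_neg (fun hx => h1 (hc.mp hx)), if_neg h1]; simp
    rw [hstep]
    simp

-- A equals the copy-major matrix, flattened
theorem A_eq (ns : List (Int × Int × Int)) :
    replicate_inst1 ns
      = ((PySem.List.pyRange 0 33 1).map
          (fun m => (pvBase ns).map (pvShift (m * 32)))).flatten := by
  have key : ∀ (ms : List Int) (out : List (Int × Int × Int)),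
      ms.foldl (fun out m => ns.foldl (stepA (m * 32)) out) out
        = out ++ (ms.map (fun m => (pvBase ns).map (pvShift (m * 32)))).flatten := by
    intro ms
    induction ms with
    | nil => intro out; simp
    | cons h t ih =>
      intro out
      rw [List.foldl_cons, inner_eq, ih]
      simp
  show (PySem.List.pyRange 0 33 1).foldl (fun out m => ns.foldl (stepA (m * 32)) out) [] = _
  rw [key]
  simp

-- B's cols fold maps the row-builder over the base
theorem cols_eq (ns : List (Int × Int × Int)) (acc : List (List (Int × Int × Int))) :
    ns.foldl stepCols acc
      = acc ++ (pvBase ns).map (fun b => (PySem.List.pyRange 0 33 1).map (fun m => pvShift (m * 32) b)) := by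
  induction ns generalizing acc with
  | nil => simp [pvBase]
  | cons h t ih =>
    obtain ⟨s, p, e⟩ := h
    rw [List.foldl_cons, ih]
    have hb : pvBase ((s, p, e) :: t) = stepBase [] (s, p, e) ++ pvBase t := by
      rw [pvBase, List.foldl_cons, base_acc]
    rw [hb]
    unfold stepCols stepBase pvShift
    dsimp only
    split_ifs <;> simp

-- transposing a rectangular map-matrix (nonempty column list)
theorem zipStar_map {α β : Type} (ms : List β) (L : List α) (f : α → β → (Int × Int × Int))
    (hL : L ≠ []) :
    pyZipStar (L.map (fun b => ms.map (f b))) = ms.map (fun m => L.map (fun b => f b m)) := by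
  induction ms generalizing L with
  | nil =>
    obtain ⟨b, bs, rfl⟩ := List.exists_cons_of_ne_nil hL
    rw [pyZipStar]
    simp
  | cons m ms' ih =>
    obtain ⟨b, bs, rfl⟩ := List.exists_cons_of_ne_nil hL
    rw [pyZipStar]
    have hne : ¬((b :: bs).map (fun b => (m :: ms').map (f b)) = []
        ∨ ((b :: bs).map (fun b => (m :: ms').map (f b))).any (fun c => c.isEmpty)) := by
      simp
    rw [dif_neg hne]
    have h1 : ((b :: bs).map (fun b => (m :: ms').map (f b))).map (fun c => c.headI)
        = (b :: bs).map (fun b => f b m) := by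
      simp [List.map_map, Function.comp]
    have h2 : ((b :: bs).map (fun b => (m :: ms').map (f b))).map (fun c => c.tail)
        = (b :: bs).map (fun b => ms'.map (f b)) := by
      simp [List.map_map, Function.comp]
    rw [h1, h2, ih _ (by simp)]
    rfl

theorem fold_append_flatten {α : Type} (rows : List (List α)) (out : List α) :
    rows.foldl (fun out r => out ++ r) out = out ++ rows.flatten := by
  induction rows generalizing out with
  | nil => simp
  | cons r rs ih => simp [ih]

-- ===== VERDICT (by name: the statement is the Claim_ definition above) =====
theorem replicate_inst1_spec : Claim_equal_replicate_inst1 := by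
  intro ns _
  unfold Spec_replicate_inst1
  show replicate_inst1 ns
      = (pyZipStar (ns.foldl stepCols [])).foldl (fun out row => out ++ row) []
  rw [cols_eq, List.nil_append, fold_append_flatten, List.nil_append]
  by_cases hb : pvBase ns = []
  · rw [A_eq, hb, List.map_nil, pyZipStar]
    simp
  · rw [zipStar_map _ _ _ hb, A_eq]
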